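-- pv_equiv track=rewrite | github.com/LikeKugi/stepik_python | stepik/algorithms/huffman/ex0.py | create_encoding
-- ===== SOURCE A (Python) =====
-- from collections import namedtuple
-- import heapq
--
-- class Node(namedtuple('Node', ['left', 'right'])):
--
--     def walk(self, code, acc):
--         self.left.walk(code, acc + '0')
--         self.right.walk(code, acc + '1')
--
-- class Leaf(namedtuple('Leaf', ['char'])):
--
--     def walk(self, code, acc):
--         code[self.char] = acc or '0'
--
-- def create_encoding(frequencies: dict):
--     h = []
--     for ch, freq in frequencies.items():
--         h.append((freq, len(h), Leaf(ch)))
--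
--     heapq.heapify(h)
--
--     count = len(h)
--     while len(h) > 1:
--         freq1, _count1, left = heapq.heappop(h)
--         freq2, _count2, right = heapq.heappop(h)
--         heapq.heappush(h, (freq1 + freq2, count, Node(left, right)))
--         count += 1
--     code = {}
--     if h:
--         [(_freq, _count, root)] = h
--
--         root.walk(code, '')
--     return code
-- ===== SOURCE B (Python) =====
-- def _insort(entries, key, item):
--     # entries is sorted by the (freq, counter) tuple prefix; binary-search the first
--     # position whose prefix is not below key and insert item there
--     lo, hi = 0, len(entries)
--     while lo < hi:
--         mid = (lo + hi) // 2
--         if entries[mid][:2] < key: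
--             lo = mid + 1
--         else:
--             hi = mid
--     entries.insert(lo, item)
--
--
-- def create_encoding(frequencies: dict):
--     # sorted work list instead of a heap+tree: entries are (freq, counter, [(char, partial_code), ...]);
--     # pop the two front (minimal) entries, prepend a bit to every code, binary-insert the merge back.
--     entries = []
--     for i, (c, f) in enumerate(frequencies.items()):
--         _insort(entries, (f, i), (f, i, [(c, '')]))
--     nxt = len(entries)
--     while len(entries) > 1:
--         f1, _, p1 = entries.pop(0)
--         f2, _, p2 = entries.pop(0)
--         merged = [(c, '0' + s) for c, s in p1] + [(c, '1' + s) for c, s in p2]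
--         _insort(entries, (f1 + f2, nxt), (f1 + f2, nxt, merged))
--         nxt += 1
--     if not entries:
--         return {}
--     return {c: s or '0' for c, s in entries[0][2]}
-- ===== Notes on version B (the rewrite author's own statement) =====
-- stated objective: alternative
-- what changed: B drops both the heap and the Leaf/Node tree: it keeps a list of (freq, counter, char->partial-code pairs) entries sorted by (freq, counter), always merges the two front entries (prepending a '0'/'1' bit to every code of each) and binary-inserts the merged entry back into sorted position, so the codes are read off the single surviving entry with no tree, no recursive walk and no heap operations.
import Mathlib
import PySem

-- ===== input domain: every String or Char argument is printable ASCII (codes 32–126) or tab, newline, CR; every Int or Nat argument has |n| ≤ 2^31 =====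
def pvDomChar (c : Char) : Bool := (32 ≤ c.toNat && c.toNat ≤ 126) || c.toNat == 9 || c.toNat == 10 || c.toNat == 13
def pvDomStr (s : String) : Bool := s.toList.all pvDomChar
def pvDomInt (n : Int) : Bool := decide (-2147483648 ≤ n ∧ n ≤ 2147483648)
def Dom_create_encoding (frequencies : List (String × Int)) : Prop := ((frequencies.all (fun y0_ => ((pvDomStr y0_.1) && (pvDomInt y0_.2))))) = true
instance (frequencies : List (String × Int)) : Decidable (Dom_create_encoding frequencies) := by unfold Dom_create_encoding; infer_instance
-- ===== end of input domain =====

-- B replaces A's heap of Leaf/Node trees by a LIST KEPT SORTED by (freq, counter) whose payloads are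
-- char->partial-code pair lists: merge the two front entries, splice the result back in order, read codes off.

-- ===== PORT A =====

-- heap entries are (freq, counter, payload); counters are pairwise distinct, so Python's tuple
-- comparison is exactly lexicographic on (freq, counter) and heappop returns the unique minimum.
-- hLt is that order; popMin1 is heappop's contract: the minimal entry and the rest of the heap.
def hLt (a b : Int × Int) : Bool := a.1 < b.1 || (a.1 == b.1 && a.2 < b.2)

def popMin1 {α : Type} (x : Int × Int × α) (xs : List (Int × Int × α)) :
    (Int × Int × α) × List (Int × Int × α) :=
  match xs with
  | [] => (x, [])
  | y :: ys =>
    let p := popMin1 y ys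
    if hLt (p.1.1, p.1.2.1) (x.1, x.2.1) then (p.1, x :: p.2) else (x, xs)

inductive HTree where
  | leaf : String → HTree
  | node : HTree → HTree → HTree
deriving DecidableEq, Repr

-- h.append((freq, len(h), Leaf(ch)))
def initA : List (String × Int) → Int → List (Int × Int × HTree)
  | [], _ => []
  | (ch, f) :: rest, i => (f, i, HTree.leaf ch) :: initA rest (i + 1)

-- the while-loop; each iteration shrinks the heap by exactly one, so gas = len(h) suffices
def loopA : Nat → List (Int × Int × HTree) → Int → List (Int × Int × HTree)
  | 0, h, _ => h
  | g + 1, h, count =>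
    match h with
    | x :: y :: rest =>
      match popMin1 x (y :: rest) with
      | (l, h1) =>
        match h1 with
        | [] => h
        | z :: zs =>
          match popMin1 z zs with
          | (r, h2) => loopA g ((l.1 + r.1, count, HTree.node l.2.2 r.2.2) :: h2) (count + 1)
    | _ => h

-- Node.walk / Leaf.walk (code[self.char] = acc or '0')
def walkA : HTree → String → PySem.Dict String String → PySem.Dict String String
  | HTree.leaf c, acc, code => code.insert c (if acc = "" then "0" else acc)
  | HTree.node l r, acc, code => walkA r (acc ++ "1") (walkA l (acc ++ "0") code)

def create_encoding (frequencies : List (String × Int)) : List (String × String) :=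
  let h := initA frequencies 0
  match loopA h.length h (h.length : Int) with
  | [] => []
  | (_, _, root) :: _ => (walkA root "" PySem.Dict.empty).items

-- ===== PORT B =====

-- Python's tuple '<' restricted to the (freq, counter) prefix (the payload is never compared: counters differ)
def bLt (a b : Int × Int) : Bool := a.1 < b.1 || (a.1 == b.1 && a.2 < b.2)

-- the while-loop of _insort: binary search for the first index in [lo, hi) whose (freq, counter)
-- prefix is not below key; entries[mid] is always in range (mid < hi ≤ len), so pyGetD's default is never
-- read, and (lo + hi) / 2 is Python's (lo + hi) // 2 exactly: lo, hi are nonnegative indices (Nat)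
def bsearch (entries : List (Int × Int × List (String × String))) (key : Int × Int)
    (lo hi : Nat) : Nat :=
  if h : lo < hi then
    let mid := (lo + hi) / 2
    let em := PySem.List.pyGetD entries (mid : Int) (0, 0, [])
    if bLt (em.1, em.2.1) key then bsearch entries key (mid + 1) hi
    else bsearch entries key lo mid
  else lo
termination_by hi - lo
decreasing_by all_goals omega

-- _insort(entries, key, item)
def insortB (entries : List (Int × Int × List (String × String))) (key : Int × Int)
    (item : Int × Int × List (String × String)) : List (Int × Int × List (String × String)) :=
  PySem.List.insert entries ((bsearch entries key 0 entries.length : Nat) : Int) item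

-- the enumerate loop: _insort each leaf entry (f, i, [(c, '')])
def initB : List (String × Int) → Int → List (Int × Int × List (String × String)) →
    List (Int × Int × List (String × String))
  | [], _, acc => acc
  | (c, f) :: rest, i, acc => initB rest (i + 1) (insortB acc (f, i) (f, i, [(c, "")]))

-- the while-loop: merge the two FRONT entries (the minima), bit-extend their code pairs, _insort the merge
def loopB : Nat → List (Int × Int × List (String × String)) → Int →
    List (Int × Int × List (String × String))
  | 0, s, _ => s
  | g + 1, s, nxt =>
    match s with
    | e1 :: e2 :: tail =>
      loopB g
        (insortB tail (e1.1 + e2.1, nxt)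
          (e1.1 + e2.1, nxt,
            e1.2.2.map (fun p => (p.1, "0" ++ p.2)) ++ e2.2.2.map (fun p => (p.1, "1" ++ p.2))))
        (nxt + 1)
    | _ => s

def create_encoding_alt (frequencies : List (String × Int)) : List (String × String) :=
  let s := initB frequencies 0 []
  match loopB s.length s (s.length : Int) with
  | [] => []
  | (_, _, m) :: _ => m.map (fun p => (p.1, if p.2 = "" then "0" else p.2))

-- ===== PRECONDITION & SPEC =====
-- Pre_ excludes association lists with duplicate keys: they do not represent a Python dict
-- (the 'frequencies' argument), whose keys are necessarily distinct.
def Pre_create_encoding (frequencies : List (String × Int)) : Prop :=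
  (frequencies.map Prod.fst).Nodup
instance (frequencies : List (String × Int)) : Decidable (Pre_create_encoding frequencies) := by
  unfold Pre_create_encoding; infer_instance

def pvWitness_create_encoding : (List (String × Int)) := [("a", 5), ("b", 2), ("c", 1)]

def Spec_create_encoding (frequencies : List (String × Int)) (out : List (String × String)) : Prop := out = create_encoding_alt frequencies
instance (frequencies : List (String × Int)) (out : List (String × String)) : Decidable (Spec_create_encoding frequencies out) := by unfold Spec_create_encoding; infer_instance

-- ===== CLAIM (what is proved, stated in full; the proofs are below) =====
def Claim_equal_create_encoding : Prop := ∀ (frequencies : List (String × Int)), Dom_create_encoding frequencies → Pre_create_encoding frequencies → Spec_create_encoding frequencies (create_encoding frequencies)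

-- ===== LEMMAS AND PROOFS =====

-- leaves of an A-tree with their code suffixes: the B-payload a tree corresponds to
def leavesRel : HTree → List (String × String)
  | HTree.leaf c => [(c, "")]
  | HTree.node l r =>
    (leavesRel l).map (fun p => (p.1, "0" ++ p.2)) ++ (leavesRel r).map (fun p => (p.1, "1" ++ p.2))

def gRel (x : Int × Int × HTree) : Int × Int × List (String × String) :=
  (x.1, x.2.1, leavesRel x.2.2)

-- the (freq, counter) key, and lex ≤ on it
def kLe (a b : Int × Int) : Prop := a.1 < b.1 ∨ (a.1 = b.1 ∧ a.2 ≤ b.2)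

theorem bLt_iff (a b : Int × Int) : bLt a b = true ↔ (a.1 < b.1 ∨ (a.1 = b.1 ∧ a.2 < b.2)) := by
  simp [bLt]

theorem hLt_iff (a b : Int × Int) : hLt a b = true ↔ (a.1 < b.1 ∨ (a.1 = b.1 ∧ a.2 < b.2)) := by
  simp [hLt]

-- ---- splice: the linear-scan insertion that insortB's binary search implements ----
def splice (e : Int × Int × List (String × String)) :
    List (Int × Int × List (String × String)) → List (Int × Int × List (String × String))
  | [] => [e]
  | x :: xs => if bLt (x.1, x.2.1) (e.1, e.2.1) then x :: splice e xs else e :: x :: xs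

theorem splice_perm (e : Int × Int × List (String × String)) (s : List (Int × Int × List (String × String))) :
    (splice e s).Perm (e :: s) := by
  induction s with
  | nil => exact List.Perm.refl _
  | cons x xs ih =>
    simp only [splice]
    split
    · exact (ih.cons x).trans (List.Perm.swap _ _ _)
    · exact List.Perm.refl _

theorem splice_sorted (e : Int × Int × List (String × String))
    (s : List (Int × Int × List (String × String)))
    (hs : s.Pairwise (fun a b => kLe (a.1, a.2.1) (b.1, b.2.1))) :
    (splice e s).Pairwise (fun a b => kLe (a.1, a.2.1) (b.1, b.2.1)) := by
  induction s with
  | nil => simp [splice]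
  | cons x xs ih =>
    rcases List.pairwise_cons.mp hs with ⟨hx, hxs⟩
    simp only [splice]
    split
    · rename_i hlt
      refine List.pairwise_cons.mpr ⟨?_, ih hxs⟩
      intro y hy
      rcases List.mem_cons.mp ((splice_perm e xs).mem_iff.mp hy) with rfl | hy
      · rw [bLt_iff] at hlt; unfold kLe; rcases hlt with h | ⟨h1, h2⟩
        · exact Or.inl h
        · exact Or.inr ⟨h1, le_of_lt h2⟩
      · exact hx y hy
    · rename_i hnlt
      have hex : kLe (e.1, e.2.1) (x.1, x.2.1) := by
        have := (not_congr (bLt_iff (x.1, x.2.1) (e.1, e.2.1))).mp (by simpa using hnlt)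
        unfold kLe; simp at this ⊢; omega
      refine List.pairwise_cons.mpr ⟨?_, hs⟩
      intro y hy
      rcases List.mem_cons.mp hy with rfl | hy
      · exact hex
      · have hxy := hx y hy
        unfold kLe at hex hxy ⊢; omega

theorem bLt_false_iff (a b : Int × Int) :
    bLt a b = false ↔ (b.1 < a.1 ∨ (b.1 = a.1 ∧ b.2 ≤ a.2)) := by
  rw [← Bool.not_eq_true, bLt_iff]; omega

theorem bsearch_base (entries : List (Int × Int × List (String × String))) (key : Int × Int)
    (lo hi : Nat) (h : ¬ lo < hi) : bsearch entries key lo hi = lo := by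
  rw [bsearch]; simp [h]

theorem bsearch_step (entries : List (Int × Int × List (String × String))) (key : Int × Int)
    (lo hi : Nat) (h : lo < hi) :
    bsearch entries key lo hi =
      (if bLt ((PySem.List.pyGetD entries (((lo + hi) / 2 : Nat) : Int) (0, 0, [])).1,
               (PySem.List.pyGetD entries (((lo + hi) / 2 : Nat) : Int) (0, 0, [])).2.1) key
       then bsearch entries key ((lo + hi) / 2 + 1) hi
       else bsearch entries key lo ((lo + hi) / 2)) := by
  rw [bsearch]; simp [h]

theorem bsearch_spec (t : List (Int × Int × List (String × String))) (key : Int × Int)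
    (ht : t.Pairwise (fun a b => kLe (a.1, a.2.1) (b.1, b.2.1))) :
    ∀ (d lo hb : Nat), hb - lo ≤ d → lo ≤ hb → hb ≤ t.length →
    (∀ i (h : i < t.length), i < lo → bLt ((t[i]).1, (t[i]).2.1) key = true) →
    (∀ i (h : i < t.length), hb ≤ i → bLt ((t[i]).1, (t[i]).2.1) key = false) →
    bsearch t key lo hb ≤ t.length ∧
    (∀ i (h : i < t.length), i < bsearch t key lo hb → bLt ((t[i]).1, (t[i]).2.1) key = true) ∧
    (∀ i (h : i < t.length), bsearch t key lo hb ≤ i → bLt ((t[i]).1, (t[i]).2.1) key = false) := by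
  have hmono : ∀ i j (hi' : i < t.length) (hj : j < t.length), i ≤ j →
      kLe ((t[i]).1, (t[i]).2.1) ((t[j]).1, (t[j]).2.1) := by
    intro i j hi' hj hij
    rcases Nat.eq_or_lt_of_le hij with rfl | hlt
    · unfold kLe; omega
    · exact List.pairwise_iff_getElem.mp ht i j hi' hj hlt
  intro d
  induction d with
  | zero =>
    intro lo hb hd hlh hhb H1 H2
    have hlo : lo = hb := by omega
    rw [bsearch_base _ _ _ _ (by omega)]
    exact ⟨by omega, fun i h hilt => H1 i h hilt, fun i h hilt => H2 i h (by omega)⟩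
  | succ d ihd =>
    intro lo hb hd hlh hhb H1 H2
    by_cases hc : lo < hb
    · rw [bsearch_step _ _ _ _ hc]
      have hmidlt : (lo + hb) / 2 < t.length := by omega
      have hget : PySem.List.pyGetD t (((lo + hb) / 2 : Nat) : Int) (0, 0, []) = t[(lo + hb) / 2] := by
        rw [PySem.List.pyGetD_natCast, List.getD_eq_getElem _ _ hmidlt]
      rw [hget]
      split
      · rename_i hcond
        refine ihd ((lo + hb) / 2 + 1) hb (by omega) (by omega) hhb ?_ H2
        intro i h hilt
        by_cases hilo : i < lo
        · exact H1 i h hilo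
        · have hkle := hmono i ((lo + hb) / 2) h hmidlt (by omega)
          rw [bLt_iff] at hcond ⊢
          unfold kLe at hkle
          omega
      · rename_i hcond
        rw [Bool.not_eq_true] at hcond
        refine ihd lo ((lo + hb) / 2) (by omega) (by omega) (by omega) H1 ?_
        intro i h hilt
        by_cases hihi : hb ≤ i
        · exact H2 i h hihi
        · have hkle := hmono ((lo + hb) / 2) i hmidlt h (by omega)
          rw [bLt_false_iff] at hcond ⊢
          unfold kLe at hkle
          omega
    · rw [bsearch_base _ _ _ _ hc]
      exact ⟨by omega, fun i h hilt => H1 i h hilt, fun i h hilt => H2 i h (by omega)⟩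

theorem splice_eq_take_drop (e : Int × Int × List (String × String))
    (t : List (Int × Int × List (String × String))) (j : Nat) (hj : j ≤ t.length)
    (h1 : ∀ i (h : i < t.length), i < j → bLt ((t[i]).1, (t[i]).2.1) (e.1, e.2.1) = true)
    (h2 : ∀ i (h : i < t.length), j ≤ i → bLt ((t[i]).1, (t[i]).2.1) (e.1, e.2.1) = false) :
    t.take j ++ e :: t.drop j = splice e t := by
  induction t generalizing j with
  | nil =>
    have : j = 0 := by simpa using hj
    subst this; simp [splice]
  | cons x xs ih =>
    cases j with
    | zero =>
      have hx := h2 0 (by simp) (by omega)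
      simp only [List.getElem_cons_zero] at hx
      simp [splice, hx]
    | succ j =>
      have hx := h1 0 (by simp) (by omega)
      simp only [List.getElem_cons_zero] at hx
      simp only [List.take_succ_cons, List.drop_succ_cons, List.cons_append, splice, hx, if_pos]
      refine congrArg (x :: ·) (ih j (by simpa using hj) ?_ ?_)
      · intro i h hi
        have := h1 (i + 1) (by simpa using Nat.succ_lt_succ h) (by omega)
        simpa using this
      · intro i h hi
        have := h2 (i + 1) (by simpa using Nat.succ_lt_succ h) (by omega)
        simpa using this

-- the binary-search insert is exactly the linear splice on a sorted list
theorem insort_eq_splice (entries : List (Int × Int × List (String × String)))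
    (key : Int × Int) (item : Int × Int × List (String × String))
    (hk : key = (item.1, item.2.1))
    (hs : entries.Pairwise (fun a b => kLe (a.1, a.2.1) (b.1, b.2.1))) :
    insortB entries key item = splice item entries := by
  subst hk
  obtain ⟨hj, h1, h2⟩ := bsearch_spec entries (item.1, item.2.1) hs entries.length 0 entries.length
    (by omega) (by omega) (le_refl _)
    (fun i h hi => absurd hi (by omega)) (fun i h hi => absurd hi (by omega))
  unfold insortB
  rw [PySem.List.insert_natCast _ _ _ hj]
  exact splice_eq_take_drop item entries _ hj h1 h2

-- ---- popMin1 (the A-side heap pop) ----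
theorem popMin1_perm {α : Type} (x : Int × Int × α) (xs : List (Int × Int × α)) :
    (x :: xs).Perm ((popMin1 x xs).1 :: (popMin1 x xs).2) := by
  induction xs generalizing x with
  | nil => exact List.Perm.refl _
  | cons y ys ih =>
    simp only [popMin1]
    by_cases h : hLt ((popMin1 y ys).1.1, (popMin1 y ys).1.2.1) (x.1, x.2.1) = true
    · simp only [h, if_pos]
      exact ((ih y).cons x).trans (List.Perm.swap _ _ _)
    · simp only [eq_false_of_ne_true h, if_neg, Bool.false_eq_true, not_false_iff]
      exact List.Perm.refl _

theorem popMin1_min {α : Type} (x : Int × Int × α) (xs : List (Int × Int × α)) :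
    ∀ y ∈ x :: xs, kLe ((popMin1 x xs).1.1, (popMin1 x xs).1.2.1) (y.1, y.2.1) := by
  induction xs generalizing x with
  | nil =>
    intro y hy; simp at hy; subst hy
    simp only [popMin1]; unfold kLe; omega
  | cons z zs ih =>
    intro y hy
    simp only [popMin1]
    by_cases h : hLt ((popMin1 z zs).1.1, (popMin1 z zs).1.2.1) (x.1, x.2.1) = true
    · simp only [h, if_pos]
      rcases List.mem_cons.mp hy with rfl | hy
      · rw [hLt_iff] at h; unfold kLe at *; omega
      · exact ih z y hy
    · simp only [eq_false_of_ne_true h, if_neg, Bool.false_eq_true, not_false_iff]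
      have hxz : kLe (x.1, x.2.1) ((popMin1 z zs).1.1, (popMin1 z zs).1.2.1) := by
        have := (not_congr (hLt_iff _ _)).mp (by simpa using h)
        unfold kLe; omega
      rcases List.mem_cons.mp hy with rfl | hy
      · unfold kLe; omega
      · have := ih z y hy; unfold kLe at *; omega

theorem popMin1_len {α : Type} (x : Int × Int × α) (xs : List (Int × Int × α)) :
    (popMin1 x xs).2.length = xs.length := by
  induction xs generalizing x with
  | nil => rfl
  | cons y ys ih =>
    simp only [popMin1]
    by_cases h : hLt ((popMin1 y ys).1.1, (popMin1 y ys).1.2.1) (x.1, x.2.1) = true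
    · simp [h, ih y]
    · simp [eq_false_of_ne_true h]

-- ---- unique minimum: sorted head = heap pop, through gRel ----
theorem head_eq_gRel_min (h : List (Int × Int × HTree)) (l : Int × Int × HTree)
    (s1 : Int × Int × List (String × String)) (st : List (Int × Int × List (String × String)))
    (hperm : (s1 :: st).Perm (h.map gRel))
    (hsort : (s1 :: st).Pairwise (fun a b => kLe (a.1, a.2.1) (b.1, b.2.1)))
    (hnd : (h.map (fun x => x.2.1)).Nodup)
    (hl : l ∈ h) (hmin : ∀ y ∈ h, kLe (l.1, l.2.1) (y.1, y.2.1)) :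
    s1 = gRel l := by
  have hs1m : s1 ∈ h.map gRel := hperm.subset (List.mem_cons_self)
  rcases List.mem_map.mp hs1m with ⟨a, ha, hae⟩
  have hgl : gRel l ∈ s1 :: st := hperm.mem_iff.mpr (List.mem_map_of_mem hl)
  have h1 : kLe (s1.1, s1.2.1) ((gRel l).1, (gRel l).2.1) := by
    rcases List.mem_cons.mp hgl with hgl | hgl
    · rw [hgl]; unfold kLe; omega
    · exact (List.pairwise_cons.mp hsort).1 _ hgl
  have h2 : kLe (l.1, l.2.1) (a.1, a.2.1) := hmin a ha
  rw [← hae] at h1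
  have hkey : a.2.1 = l.2.1 := by
    simp only [gRel] at h1
    unfold kLe at h1 h2; omega
  have hal : a = l := List.inj_on_of_nodup_map hnd ha hl hkey
  rw [← hae, hal]

-- ===== the main invariant: B's sorted list is a gRel-image permutation of A's heap =====
theorem loop_perm (g : Nat) :
    ∀ (h : List (Int × Int × HTree)) (s : List (Int × Int × List (String × String))) (count : Int),
      s.Perm (h.map gRel) →
      s.Pairwise (fun a b => kLe (a.1, a.2.1) (b.1, b.2.1)) →
      (h.map (fun x => x.2.1)).Nodup →
      (∀ x ∈ h, x.2.1 < count) →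
      (loopB g s count).Perm ((loopA g h count).map gRel) := by
  induction g with
  | zero => intro h s c hp _ _ _; simpa [loopA, loopB] using hp
  | succ g ih =>
    intro h s count hperm hsort hnd hlt
    rcases h with _ | ⟨x, yrest⟩
    · have hs : s = [] := List.Perm.eq_nil (by simpa using hperm)
      subst hs; simp [loopA, loopB]
    rcases yrest with _ | ⟨y, rest⟩
    · have hs : s = [gRel x] := List.perm_singleton.mp (by simpa using hperm)
      subst hs; simp [loopA, loopB]
    rcases hp1 : popMin1 x (y :: rest) with ⟨l, h1⟩
    have perm1 : (x :: y :: rest).Perm (l :: h1) := by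
      have := popMin1_perm x (y :: rest); rwa [hp1] at this
    have hmin1 : ∀ w ∈ x :: y :: rest, kLe (l.1, l.2.1) (w.1, w.2.1) := by
      have := popMin1_min x (y :: rest); rwa [hp1] at this
    have hlmem : l ∈ x :: y :: rest := perm1.symm.subset (List.mem_cons_self)
    have hslen : s.length = rest.length + 2 := by
      rw [hperm.length_eq, List.length_map]; rfl
    rcases s with _ | ⟨s1, s2st⟩
    · simp at hslen
    rcases s2st with _ | ⟨s2, st⟩
    · simp at hslen
    have hs1 : s1 = gRel l := head_eq_gRel_min _ l s1 (s2 :: st) hperm hsort hnd hlmem hmin1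
    have hperm1 : (s2 :: st).Perm (h1.map gRel) := by
      have := hperm.trans (perm1.map gRel)
      rw [hs1] at this
      exact this.cons_inv
    have hnd1 : (h1.map (fun x => x.2.1)).Nodup := by
      have := (perm1.map (fun x => x.2.1)).nodup_iff.mp hnd
      exact (List.nodup_cons.mp this).2
    have h1len : h1.length = rest.length + 1 := by
      have := popMin1_len x (y :: rest); rw [hp1] at this; simpa using this
    rcases h1 with _ | ⟨z, zs⟩
    · simp at h1len
    rcases hp2 : popMin1 z zs with ⟨r, h2⟩
    have perm2 : (z :: zs).Perm (r :: h2) := by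
      have := popMin1_perm z zs; rwa [hp2] at this
    have hmin2 : ∀ w ∈ z :: zs, kLe (r.1, r.2.1) (w.1, w.2.1) := by
      have := popMin1_min z zs; rwa [hp2] at this
    have hrmem : r ∈ z :: zs := perm2.symm.subset (List.mem_cons_self)
    have hs2 : s2 = gRel r :=
      head_eq_gRel_min _ r s2 st hperm1 (List.Pairwise.of_cons hsort) hnd1 hrmem hmin2
    have hperm2 : st.Perm (h2.map gRel) := by
      have := hperm1.trans (perm2.map gRel)
      rw [hs2] at this
      exact this.cons_inv
    have hmem2 : ∀ w ∈ h2, w ∈ x :: y :: rest := by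
      intro w hw
      exact perm1.symm.subset (List.mem_cons_of_mem _ (perm2.symm.subset (List.mem_cons_of_mem _ hw)))
    have hnd2 : ((((l.1 + r.1, count, HTree.node l.2.2 r.2.2)) :: h2).map (fun x => x.2.1)).Nodup := by
      have hndh2 : (h2.map (fun x => x.2.1)).Nodup := by
        have := (perm2.map (fun x => x.2.1)).nodup_iff.mp hnd1
        exact (List.nodup_cons.mp this).2
      refine List.nodup_cons.mpr ⟨?_, hndh2⟩
      intro hc
      rcases List.mem_map.mp hc with ⟨w, hw, hwc⟩
      have := hlt w (hmem2 w hw)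
      simp only at hwc
      omega
    have hlt2 : ∀ w ∈ ((l.1 + r.1, count, HTree.node l.2.2 r.2.2)) :: h2, w.2.1 < count + 1 := by
      intro w hw
      rcases List.mem_cons.mp hw with rfl | hw
      · simp
      · have := hlt w (hmem2 w hw); omega
    simp only [loopA, loopB, hp1, hp2]
    rw [insort_eq_splice st (s1.1 + s2.1, count)
      (s1.1 + s2.1, count,
        s1.2.2.map (fun p => (p.1, "0" ++ p.2)) ++ s2.2.2.map (fun p => (p.1, "1" ++ p.2)))
      rfl (List.Pairwise.of_cons (List.Pairwise.of_cons hsort))]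
    have heB : (s1.1 + s2.1, count,
        s1.2.2.map (fun p => (p.1, "0" ++ p.2)) ++ s2.2.2.map (fun p => (p.1, "1" ++ p.2)))
        = gRel (l.1 + r.1, count, HTree.node l.2.2 r.2.2) := by
      rw [hs1, hs2]; rfl
    rw [heB]
    refine ih _ _ _ ?_ ?_ hnd2 hlt2
    · exact (splice_perm _ st).trans ((hperm2.cons _))
    · exact splice_sorted _ st (List.Pairwise.of_cons (List.Pairwise.of_cons hsort))

-- A's loop ends with at most one heap entry
theorem lenA (g : Nat) : ∀ (h : List (Int × Int × HTree)) (c : Int),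
    h.length ≤ g + 1 → (loopA g h c).length ≤ 1 := by
  induction g with
  | zero => intro h c hl; simpa [loopA] using hl
  | succ g ih =>
    intro h c hl
    rcases h with _ | ⟨x, yrest⟩
    · simp [loopA]
    rcases yrest with _ | ⟨y, rest⟩
    · simp [loopA]
    rcases hp1 : popMin1 x (y :: rest) with ⟨l, h1⟩
    have h1len : h1.length = rest.length + 1 := by
      have := popMin1_len x (y :: rest); rw [hp1] at this; simpa using this
    rcases h1 with _ | ⟨z, zs⟩
    · simp at h1len
    rcases hp2 : popMin1 z zs with ⟨r, h2⟩
    have h2len : h2.length = zs.length := by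
      have := popMin1_len z zs; rw [hp2] at this; simpa using this
    simp only [loopA, hp1, hp2]
    apply ih
    simp only [List.length_cons] at hl h1len ⊢
    omega

-- multiset of leaf characters carried by a heap
def keysA (h : List (Int × Int × HTree)) : List String :=
  h.flatMap (fun x => (leavesRel x.2.2).map Prod.fst)

theorem leaves_fst_node (l r : HTree) :
    (leavesRel (HTree.node l r)).map Prod.fst
      = (leavesRel l).map Prod.fst ++ (leavesRel r).map Prod.fst := by
  simp [leavesRel, List.map_map, Function.comp_def]

theorem keysA_perm_of_perm {h h' : List (Int × Int × HTree)} (hp : h.Perm h') :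
    (keysA h).Perm (keysA h') := hp.flatMap_right _

theorem keysA_loopA (g : Nat) : ∀ (h : List (Int × Int × HTree)) (c : Int),
    (keysA (loopA g h c)).Perm (keysA h) := by
  induction g with
  | zero => intro h c; exact List.Perm.refl _
  | succ g ih =>
    intro h c
    rcases h with _ | ⟨x, yrest⟩
    · exact List.Perm.refl _
    rcases yrest with _ | ⟨y, rest⟩
    · exact List.Perm.refl _
    rcases hp1 : popMin1 x (y :: rest) with ⟨l, h1⟩
    have perm1 : (x :: y :: rest).Perm (l :: h1) := by
      have := popMin1_perm x (y :: rest); rwa [hp1] at this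
    have h1len : h1.length = rest.length + 1 := by
      have := popMin1_len x (y :: rest); rw [hp1] at this; simpa using this
    rcases h1 with _ | ⟨z, zs⟩
    · simp at h1len
    rcases hp2 : popMin1 z zs with ⟨r, h2⟩
    have perm2 : (z :: zs).Perm (r :: h2) := by
      have := popMin1_perm z zs; rwa [hp2] at this
    simp only [loopA, hp1, hp2]
    refine (ih _ (c + 1)).trans ?_
    have e1 : keysA ((l.1 + r.1, c, HTree.node l.2.2 r.2.2) :: h2) = keysA (l :: r :: h2) := by
      simp [keysA, leaves_fst_node]
    rw [e1]
    exact (keysA_perm_of_perm ((perm2.symm.cons l))).trans (keysA_perm_of_perm perm1.symm)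

theorem keysA_initA (fs : List (String × Int)) : ∀ i, keysA (initA fs i) = fs.map Prod.fst := by
  induction fs with
  | nil => intro i; rfl
  | cons p rest ih => intro i; cases p; simp [initA, keysA, leavesRel] at *; simp [ih]

-- ---- the initial states ----
theorem initB_perm_sorted (fs : List (String × Int)) : ∀ (i : Int) acc,
    acc.Pairwise (fun a b => kLe (a.1, a.2.1) (b.1, b.2.1)) →
    (initB fs i acc).Perm ((initA fs i).map gRel ++ acc) ∧
    (initB fs i acc).Pairwise (fun a b => kLe (a.1, a.2.1) (b.1, b.2.1)) := by
  induction fs with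
  | nil => intro i acc hacc; exact ⟨by simp [initA, initB], hacc⟩
  | cons p rest ih =>
    intro i acc hacc
    rcases p with ⟨c, f⟩
    simp only [initA, initB, List.map_cons]
    rw [insort_eq_splice acc (f, i) (f, i, [(c, "")]) rfl hacc]
    obtain ⟨hp, hs⟩ := ih (i + 1) (splice (f, i, [(c, "")]) acc) (splice_sorted _ acc hacc)
    refine ⟨hp.trans ?_, hs⟩
    refine (List.Perm.append_left _ (splice_perm _ acc)).trans ?_
    exact List.perm_middle

theorem initA_len (fs : List (String × Int)) : ∀ (i : Int), (initA fs i).length = fs.length := by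
  induction fs with
  | nil => intro i; rfl
  | cons p rest ih => intro i; cases p; simp [initA, ih]

theorem initA_lb (fs : List (String × Int)) : ∀ (i : Int) x, x ∈ initA fs i → i ≤ x.2.1 := by
  induction fs with
  | nil => intro i x hx; simp [initA] at hx
  | cons p rest ih =>
    intro i x hx
    rcases p with ⟨c, f⟩
    rcases List.mem_cons.mp hx with rfl | hx
    · simp
    · have := ih (i + 1) x hx; omega

theorem initA_ub (fs : List (String × Int)) : ∀ (i : Int) x, x ∈ initA fs i →
    x.2.1 < i + (fs.length : Int) := by
  induction fs with
  | nil => intro i x hx; simp [initA] at hx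
  | cons p rest ih =>
    intro i x hx
    rcases p with ⟨c, f⟩
    rcases List.mem_cons.mp hx with rfl | hx
    · simp only [List.length_cons]; push_cast; omega
    · have := ih (i + 1) x hx; simp only [List.length_cons]; push_cast at *; omega

theorem initA_nodup (fs : List (String × Int)) : ∀ (i : Int),
    ((initA fs i).map (fun x => x.2.1)).Nodup := by
  induction fs with
  | nil => intro i; simp [initA]
  | cons p rest ih =>
    intro i
    rcases p with ⟨c, f⟩
    simp only [initA, List.map_cons]
    refine List.nodup_cons.mpr ⟨?_, ih (i + 1)⟩
    intro hc
    rcases List.mem_map.mp hc with ⟨w, hw, hwc⟩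
    have := initA_lb rest (i + 1) w hw
    omega

-- the unfolded walk: inserting every leaf with prefix acc
theorem walkA_foldl (t : HTree) :
    ∀ (acc : String) (code : PySem.Dict String String),
      walkA t acc code =
        (leavesRel t).foldl
          (fun d p => d.insert p.1 (if acc ++ p.2 = "" then "0" else acc ++ p.2)) code := by
  induction t with
  | leaf c => intro acc code; simp [walkA, leavesRel]
  | node l r ihl ihr =>
    intro acc code
    simp only [walkA, leavesRel, List.foldl_append, List.foldl_map, ihl, ihr,
      ← String.append_assoc]

-- ===== VERDICT (by name: the statement is the Claim_ definition above) =====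
theorem create_encoding_spec : Claim_equal_create_encoding := by
  intro fs _hdom hpre
  obtain ⟨hip, hsort0⟩ := initB_perm_sorted fs 0 [] List.Pairwise.nil
  rw [List.append_nil] at hip
  have hnd0 := initA_nodup fs 0
  have hlt0 : ∀ x ∈ initA fs 0, x.2.1 < ((initA fs 0).length : Int) := by
    intro x hx
    have := initA_ub fs 0 x hx
    rw [initA_len]
    omega
  have hlen : (initB fs 0 []).length = (initA fs 0).length := by
    rw [hip.length_eq, List.length_map]
  have main := loop_perm ((initA fs 0).length) (initA fs 0) (initB fs 0 [])
    (((initA fs 0).length : Nat) : Int) hip hsort0 hnd0 hlt0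
  have hlen1 := lenA ((initA fs 0).length) (initA fs 0) (((initA fs 0).length : Nat) : Int)
    (Nat.le_succ _)
  simp only [Spec_create_encoding, create_encoding, create_encoding_alt, hlen]
  rcases hres : loopA ((initA fs 0).length) (initA fs 0) (((initA fs 0).length : Nat) : Int)
    with _ | ⟨⟨f, c, root⟩, tl⟩
  · rw [hres] at main
    have hB : loopB ((initA fs 0).length) (initB fs 0 []) (((initA fs 0).length : Nat) : Int) = [] :=
      List.Perm.eq_nil (by simpa using main)
    rw [hB]
  · rw [hres] at main hlen1
    have htl : tl = [] := by
      simp only [List.length_cons] at hlen1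
      exact List.eq_nil_of_length_eq_zero (by omega)
    subst htl
    have hB : loopB ((initA fs 0).length) (initB fs 0 []) (((initA fs 0).length : Nat) : Int)
        = [gRel (f, c, root)] := List.perm_singleton.mp (by simpa using main)
    rw [hB]
    simp only [gRel]
    have hmnd : ((leavesRel root).map Prod.fst).Nodup := by
      have hk := (keysA_loopA ((initA fs 0).length) (initA fs 0) (((initA fs 0).length : Nat) : Int))
      rw [hres, keysA_initA fs 0] at hk
      have : (keysA [(f, c, root)]).Nodup := hk.nodup_iff.mpr hpre
      simpa [keysA] using this
    rw [walkA_foldl]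
    have hfresh : ∀ a ∈ leavesRel root,
        (PySem.Dict.empty : PySem.Dict String String).contains a.1 = false := by
      intro a _; simp [pysem]
    have hit := PySem.Dict.items_foldl_insert_fresh (l := leavesRel root)
      (k := fun p => p.1)
      (v := fun p => if ("" ++ p.2 : String) = "" then "0" else "" ++ p.2)
      (d := PySem.Dict.empty) hfresh hmnd
    simp only [String.empty_append] at hit ⊢
    rw [hit]
    rfl
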